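-- pv_equiv track=rewrite | github.com/pypi-data/pypi-mirror-309 | packages/deciphon-snap/deciphon_snap-1.0.3.tar.gz/deciphon_snap-1.0.3/deciphon_snap/match.py | ifind
-- ===== SOURCE A (Python) =====
-- def ifind(x: str, delim: str):
--     start = 0
--     end = x.find(delim, start)
--     while end != -1:
--         yield (start, end)
--         start = end + 1
--         end = x.find(delim, start)
--     yield (start, len(x))
-- ===== SOURCE B (Python) =====
-- def ifind(x: str, delim: str):
--     ms = [i for i in range(len(x)) if x.startswith(delim, i)]
--     starts = [0] + [m + 1 for m in ms]
--     ends = ms + [len(x)]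
--     yield from zip(starts, ends)
-- ===== Notes on version B (the rewrite author's own statement) =====
-- stated objective: alternative
-- what changed: Replaces the single-pass find/resume loop with a carried start by a staged pipeline: first build the full list of match positions with a comprehension over range(len(x)) using str.startswith, then derive the start and end columns as two separate lists and zip them, with no running state.
-- outside the precondition, e.g. on ifind('ab', ''): A returns [(0, 0), (1, 1), (2, 2), (3, 2)], B returns [(0, 0), (1, 1), (2, 2)]
import Mathlib
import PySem

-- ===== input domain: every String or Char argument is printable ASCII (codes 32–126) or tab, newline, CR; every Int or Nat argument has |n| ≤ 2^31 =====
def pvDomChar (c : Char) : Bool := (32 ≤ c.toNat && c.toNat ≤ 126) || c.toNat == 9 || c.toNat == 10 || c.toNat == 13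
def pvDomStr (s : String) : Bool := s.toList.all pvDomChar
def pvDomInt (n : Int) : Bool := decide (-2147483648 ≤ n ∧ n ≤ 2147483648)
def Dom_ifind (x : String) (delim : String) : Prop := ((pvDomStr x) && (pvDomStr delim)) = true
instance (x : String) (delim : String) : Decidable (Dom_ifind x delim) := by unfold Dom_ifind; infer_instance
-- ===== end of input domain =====

-- B replaces A's single-pass find/resume loop with a carried start by a staged pipeline:
-- collect all match positions, then zip the derived start column with the end column
-- (objective: alternative, same asymptotic cost).

-- ===== PORT A =====
-- termination helper for the while-loop port: a successful find lands in [start, len]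
theorem pvFindFromBounds (s d : List Char) (k : Nat)
    (h : ¬ PySem.Chars.findFrom s d (k : Int) none = -1) :
    k ≤ (PySem.Chars.findFrom s d (k : Int) none).toNat ∧
      (PySem.Chars.findFrom s d (k : Int) none).toNat ≤ s.length := by
  by_cases hk : k ≤ s.length
  · have heq := PySem.Chars.findFrom_natCast s d k hk
    by_cases hf : PySem.Chars.find (s.drop k) d = -1
    · rw [heq, if_pos hf] at h; exact absurd rfl h
    · have h0 : 0 ≤ PySem.Chars.find (s.drop k) d := by
        have := PySem.Chars.neg_one_le_find (s.drop k) d; omega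
      have hle : PySem.Chars.find (s.drop k) d ≤ (s.drop k).length :=
        PySem.Chars.find_le_length (s.drop k) d
      rw [List.length_drop] at hle
      rw [heq, if_neg hf]
      omega
  · exfalso; apply h
    simp only [PySem.Chars.findFrom]
    have h1 : ¬ ((k : Int) < 0) := by omega
    rw [if_neg h1, if_pos (by omega : (s.length : Int) < (k : Int))]

def ifindGo (s d : List Char) (start : Nat) : List (Int × Int) :=
  let e := PySem.Chars.findFrom s d (start : Int) none
  if h : e = -1 then [((start : Int), (s.length : Int))]
  else ((start : Int), e) :: ifindGo s d (e.toNat + 1)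
termination_by s.length + 1 - start
decreasing_by
  have := pvFindFromBounds s d start h
  omega

def ifind (x : String) (delim : String) : List (Int × Int) :=
  ifindGo x.toList delim.toList 0

-- ===== PORT B =====
-- x.startswith(delim, i) for the nonnegative i produced by range(len(x)) is exactly
-- delim.toList.isPrefixOf (x.toList.drop i.toNat)
def ifind_alt (x : String) (delim : String) : List (Int × Int) :=
  let s := x.toList
  let d := delim.toList
  let ms := (PySem.List.pyRange 0 (s.length : Int) 1).filter
              (fun i => d.isPrefixOf (s.drop i.toNat))
  let starts := (0 : Int) :: ms.map (fun m => m + 1)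
  let ends := ms ++ [(s.length : Int)]
  starts.zip ends

-- ===== PRECONDITION & SPEC =====
-- Pre_ excludes the empty delimiter, a corner nobody specifies (str.split raises there):
-- A's trailing pair there starts at the out-of-range index len+1, an artefact of resuming
-- find past the end of the string, while B's scan over the existing positions stops at the end.
def Pre_ifind (x : String) (delim : String) : Prop := delim ≠ ""
instance (x : String) (delim : String) : Decidable (Pre_ifind x delim) := by unfold Pre_ifind; infer_instance
def pvWitness_ifind : String × String := ("a,b", ",")

def Spec_ifind (x : String) (delim : String) (out : List (Int × Int)) : Prop := out = ifind_alt x delim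
instance (x : String) (delim : String) (out : List (Int × Int)) : Decidable (Spec_ifind x delim out) := by unfold Spec_ifind; infer_instance

-- ===== CLAIM (what is proved, stated in full; the proofs are below) =====
def Claim_equal_ifind : Prop := ∀ (x : String) (delim : String), Dom_ifind x delim → Pre_ifind x delim → Spec_ifind x delim (ifind x delim)

-- ===== LEMMAS AND PROOFS =====

-- the (sorted) list of match positions from index k on: common normal form of both ports
def msFrom (s d : List Char) (k : Nat) : List Nat :=
  if k < s.length then
    (if d.isPrefixOf (s.drop k) then [k] else []) ++ msFrom s d (k + 1)
  else []
termination_by s.length - k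

-- the common output shape: pairs (start, match), start resuming one past each match
def outOf (len : Nat) (st : Int) : List Nat → List (Int × Int)
  | [] => [(st, (len : Int))]
  | m :: r => (st, (m : Int)) :: outOf len ((m : Int) + 1) r

theorem msFrom_nil (s d : List Char) (k : Nat)
    (h : ∀ i, k ≤ i → ¬ d <+: s.drop i) : msFrom s d k = [] := by
  induction hk : s.length - k using Nat.strong_induction_on generalizing k with
  | _ n ih =>
    unfold msFrom
    by_cases hlt : k < s.length
    · rw [if_pos hlt, if_neg (by simpa [List.isPrefixOf_iff_prefix] using h k le_rfl)]
      subst hk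
      exact ih (s.length - (k+1)) (by omega) (k+1) (fun i hi => h i (by omega)) rfl
    · rw [if_neg hlt]

theorem msFrom_min (s d : List Char) (k m : Nat) (hm : m < s.length) (hk : k ≤ m)
    (hpre : d <+: s.drop m) (hmin : ∀ i, k ≤ i → i < m → ¬ d <+: s.drop i) :
    msFrom s d k = m :: msFrom s d (m + 1) := by
  induction hd : m - k using Nat.strong_induction_on generalizing k with
  | _ n ih =>
    conv_lhs => rw [msFrom]
    rw [if_pos (by omega : k < s.length)]
    by_cases hkm : k = m
    · subst hkm
      rw [if_pos (List.isPrefixOf_iff_prefix.mpr hpre)]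
      rfl
    · rw [if_neg (by simpa [List.isPrefixOf_iff_prefix] using hmin k le_rfl (by omega))]
      subst hd
      exact ih (m - (k+1)) (by omega) (k+1) (by omega) (fun i h1 h2 => hmin i (by omega) h2) rfl

theorem infix_drop_iff (d s : List Char) (k : Nat) :
    d <:+: s.drop k ↔ ∃ j, k ≤ j ∧ d <+: s.drop j := by
  rw [← PySem.Chars.isIn_iff_infix, ← PySem.Chars.exists_prefix_drop_iff_isIn]
  constructor
  · rintro ⟨j, hj⟩
    refine ⟨k + j, by omega, ?_⟩
    rw [List.drop_drop] at hj
    exact hj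
  · rintro ⟨j, hkj, hj⟩
    refine ⟨j - k, ?_⟩
    rw [List.drop_drop, show k + (j - k) = j by omega]
    exact hj

-- A's while loop produces outOf over msFrom (for a nonempty delimiter)
theorem ifindGo_eq (s d : List Char) (hd : d ≠ []) :
    ∀ k, k ≤ s.length → ifindGo s d k = outOf s.length (k : Int) (msFrom s d k) := by
  intro k
  induction hn : s.length + 1 - k using Nat.strong_induction_on generalizing k with
  | _ n ih =>
    intro hk
    rw [ifindGo]
    set e := PySem.Chars.findFrom s d (k : Int) none with he
    by_cases h1 : e = -1
    · rw [dif_pos h1]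
      have hno : ¬ d <:+: s.drop k :=
        (PySem.Chars.findFrom_natCast_eq_neg_one_iff s d k hk).mp h1
      rw [msFrom_nil s d k (fun i hi hp => hno ((infix_drop_iff d s k).mpr ⟨i, hi, hp⟩)), outOf]
    · rw [dif_neg h1]
      obtain ⟨hke, hpre, hmin⟩ := PySem.Chars.findFrom_natCast_spec s d k hk h1
      have he0 : 0 ≤ e := le_trans (by omega) hke
      have hmlt : e.toNat < s.length := by
        have := hpre.length_le
        rw [List.length_drop] at this
        have hd1 : 1 ≤ d.length := by
          cases d with
          | nil => exact absurd rfl hd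
          | cons a t => simp
        omega
      rw [msFrom_min s d k e.toNat hmlt (by omega) hpre hmin,
          ih (s.length + 1 - (e.toNat + 1)) (by omega) (e.toNat + 1) rfl (by omega), outOf]
      congr 2
      omega

-- msFrom is the filtered tail of the index range
theorem msFrom_eq_filter_range' (s d : List Char) :
    ∀ k, msFrom s d k = (List.range' k (s.length - k)).filter
        (fun i => d.isPrefixOf (s.drop i)) := by
  intro k
  induction hn : s.length - k using Nat.strong_induction_on generalizing k with
  | _ n ih =>
    rw [← hn, msFrom]
    by_cases hlt : k < s.length
    · have hr : List.range' k (s.length - k) = k :: List.range' (k+1) (s.length - (k+1)) := by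
        rw [show s.length - k = (s.length - (k+1)) + 1 by omega, List.range'_succ]
      rw [if_pos hlt, hr, List.filter_cons,
          ih (s.length - (k+1)) (by omega) (k+1) rfl]
      by_cases hp : d.isPrefixOf (s.drop k)
      · rw [if_pos hp, if_pos hp]; rfl
      · rw [if_neg hp, if_neg hp]; rfl
    · rw [if_neg hlt, show s.length - k = 0 by omega, List.range'_zero, List.filter_nil]

-- zipping the start column with the end column is outOf
theorem zip_eq_outOf (len : Nat) :
    ∀ (L : List Nat) (st : Int),
      (st :: L.map (fun m : Nat => (m : Int) + 1)).zip
        (L.map (fun m : Nat => (m : Int)) ++ [(len : Int)]) = outOf len st L := by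
  intro L
  induction L with
  | nil => intro st; simp [outOf]
  | cons m r ih =>
      intro st
      simp only [List.map_cons, List.cons_append, List.zip_cons_cons, outOf]
      rw [ih ((m : Int) + 1)]

theorem ifind_alt_eq (x delim : String) :
    ifind_alt x delim = outOf x.toList.length 0 (msFrom x.toList delim.toList 0) := by
  unfold ifind_alt
  simp only []
  have h1 : (PySem.List.pyRange 0 (x.toList.length : Int) 1).filter
        (fun i => delim.toList.isPrefixOf (x.toList.drop i.toNat))
      = (msFrom x.toList delim.toList 0).map (fun m : Nat => (m : Int)) := by
    rw [PySem.List.pyRange_one, msFrom_eq_filter_range' x.toList delim.toList 0,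
        List.range_eq_range', List.filter_map,
        show ((x.toList.length : Int) - 0).toNat = x.toList.length by omega, Nat.sub_zero]
    congr 1
    · funext k; simp
    · apply List.filter_congr
      intro a _
      simp
  rw [h1, List.map_map]
  exact zip_eq_outOf x.toList.length _ 0

-- ===== VERDICT (by name: the statement is the Claim_ definition above) =====
theorem ifind_spec : Claim_equal_ifind := by
  intro x delim _ hpre
  unfold Spec_ifind ifind
  have hd : delim.toList ≠ [] := by
    intro h
    exact hpre (by rwa [String.toList_eq_nil_iff] at h)
  rw [ifindGo_eq x.toList delim.toList hd 0 (Nat.zero_le _), ifind_alt_eq]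
  norm_num
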